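-- pv_equiv track=rewrite | github.com/IvanRoblesMunoz/hungry_geese_game | hungry_geese_game.py | find_final_position
-- ===== SOURCE A (Python) =====
-- def find_final_position(obs: dict) -> int:
--     """Find final player position."""
--     if len(obs["geese"][0]) == 0:
--         pos = 4 - sum([1 if len(i) == 0 else 0 for i in obs["geese"][1:]])
--
--     else:
--         geese = [0, 1, 2, 3]
--         length = [len(i) for i in obs["geese"]]
--         order = list(zip(*sorted(zip(length, geese))))[1]
--
--         pos = 4 - order.index(0)
--
--     return pos
-- ===== SOURCE B (Python) =====
-- def find_final_position(obs: dict) -> int: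
--     """Find final player position."""
--     lengths = [len(g) for g in obs["geese"]]
--     my = lengths[0]
--     if my == 0:
--         return 4 - sum(1 for l in lengths[1:] if l == 0)
--     # index 0 wins all ties, so its sorted position is the number of
--     # strictly shorter geese among the (at most) four players
--     return 4 - sum(1 for l in lengths[:4] if l < my)
-- ===== Notes on version B (the rewrite author's own statement) =====
-- stated objective: simpler
-- what changed: B replaces A's build-zip-sort-unzip-index pipeline by a single counting scan: since player index 0 wins every length tie in the stable tuple sort, its sorted position equals the number of strictly shorter geese among the first four, so B returns 4 minus that count (and keeps the separate zero-count branch for a dead player).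
-- outside the precondition, e.g. on find_final_position({}): A raises KeyError, B raises KeyError; on find_final_position({'geese': []}): A raises IndexError, B raises IndexError
import Mathlib
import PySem

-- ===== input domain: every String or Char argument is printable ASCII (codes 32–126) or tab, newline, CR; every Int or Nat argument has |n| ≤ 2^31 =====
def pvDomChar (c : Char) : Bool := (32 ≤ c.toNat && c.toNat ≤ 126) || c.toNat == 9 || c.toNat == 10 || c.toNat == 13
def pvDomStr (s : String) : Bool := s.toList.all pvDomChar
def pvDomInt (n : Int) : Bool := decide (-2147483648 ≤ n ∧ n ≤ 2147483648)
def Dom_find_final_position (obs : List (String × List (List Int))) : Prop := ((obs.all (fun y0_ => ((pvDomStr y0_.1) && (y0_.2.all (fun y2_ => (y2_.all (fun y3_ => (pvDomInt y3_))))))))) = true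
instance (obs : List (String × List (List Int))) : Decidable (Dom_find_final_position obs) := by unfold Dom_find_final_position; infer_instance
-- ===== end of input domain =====

-- B replaces A's sort-zip-index computation by a single counting scan (simpler); equal on every obs whose "geese" entry exists and is nonempty.


-- ===== PORT A =====
-- A's body over the geese list (the lookup obs["geese"] is done by the caller)
def pvA_core (gs : List (List Int)) : Int :=
  if ((PySem.List.pyGet? gs 0).getD []).length = 0 then
    4 - ((PySem.List.slice gs (some 1) none).map
          (fun i => if i.length = 0 then (1 : Int) else 0)).sum
  else
    let geese : List Int := [0, 1, 2, 3]
    let length : List Int := gs.map (fun i => (i.length : Int))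
    let order : List Int :=
      (PySem.List.sorted2 (List.zip length geese) (·.1) (·.2)).map (·.2)
    4 - (((PySem.List.index? order 0).getD 0 : Nat) : Int)

def find_final_position (obs : List (String × List (List Int))) : Int :=
  pvA_core (((PySem.Dict.mk obs).get? "geese").getD [])

-- ===== PORT B =====
def pvB_core (gs : List (List Int)) : Int :=
  let lengths : List Int := gs.map (fun g => (g.length : Int))
  let my : Int := lengths.headD 0
  if my = 0 then
    4 - ((lengths.drop 1).countP (fun l => l == 0) : Int)
  else
    4 - ((lengths.take 4).countP (fun l => decide (l < my)) : Int)

def find_final_position_alt (obs : List (String × List (List Int))) : Int :=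
  pvB_core (((PySem.Dict.mk obs).get? "geese").getD [])

-- ===== PRECONDITION & SPEC =====
-- A raises KeyError when obs has no "geese" entry and IndexError on obs["geese"][0]
-- when that entry is the empty list; Pre_ excludes exactly those inputs.
def Pre_find_final_position (obs : List (String × List (List Int))) : Prop :=
  (((PySem.Dict.mk obs).get? "geese").getD []) ≠ []
instance (obs : List (String × List (List Int))) : Decidable (Pre_find_final_position obs) := by unfold Pre_find_final_position; infer_instance

def pvWitness_find_final_position : (List (String × List (List Int))) :=
  [("geese", [[1], [], [2, 3], [0]])]

def Spec_find_final_position (obs : List (String × List (List Int))) (out : Int) : Prop := out = find_final_position_alt obs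
instance (obs : List (String × List (List Int))) (out : Int) : Decidable (Spec_find_final_position obs out) := by unfold Spec_find_final_position; infer_instance

-- ===== CLAIM (what is proved, stated in full; the proofs are below) =====
def Claim_equal_find_final_position : Prop := ∀ (obs : List (String × List (List Int))), Dom_find_final_position obs → Pre_find_final_position obs → Spec_find_final_position obs (find_final_position obs)

-- ===== LEMMAS AND PROOFS =====

theorem pv_core_eq (gs : List (List Int)) (h : gs ≠ []) : pvA_core gs = pvB_core gs := by
  obtain ⟨g0, rest, rfl⟩ := List.exists_cons_of_ne_nil h
  by_cases h0 : g0.length = 0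
  · -- dead branch: 0/1-sum over the tail equals the countP of zero lengths
    simp [pvA_core, pvB_core, h0, PySem.List.slice_from_one]
    induction rest with
    | nil => simp
    | cons a t ih => simp [ih]; split_ifs with hA <;> simp_all <;> omega
  · -- alive branch: the zip truncates at 4 entries; case on the list shape
    match rest with
    | [] =>
      simp [pvA_core, pvB_core, h0, PySem.List.sorted2, PySem.List.insertBy,
        PySem.List.index?]
    | [g1] =>
      simp [pvA_core, pvB_core, h0, PySem.List.sorted2, PySem.List.insertBy]
      split_ifs <;> simp_all <;> decide
    | [g1, g2] =>
      simp [pvA_core, pvB_core, h0, PySem.List.sorted2, PySem.List.insertBy]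
      repeat' (first
        | decide
        | omega
        | (split_ifs <;> simp_all [PySem.List.insertBy, List.countP_cons, List.countP_nil]))
    | g1 :: g2 :: g3 :: t =>
      simp [pvA_core, pvB_core, h0, PySem.List.sorted2, PySem.List.insertBy]
      repeat' (first
        | decide
        | omega
        | (split_ifs <;> simp_all [PySem.List.insertBy, List.countP_cons, List.countP_nil]))

-- ===== VERDICT (by name: the statement is the Claim_ definition above) =====
theorem find_final_position_spec : Claim_equal_find_final_position := by
  intro obs _ hpre
  unfold Spec_find_final_position find_final_position find_final_position_alt
  exact pv_core_eq _ hpre
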